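-- pv_equiv track=rewrite | github.com/PauraviW/leetcode-problems | Amazon SDE 1/ShoppingDeliveries.py | getMinTime
-- ===== SOURCE A (Python) =====
-- def getMinTime(buildingOpenTime,offloadTime):
--
--     buildingOpenTime.sort()
--
--     offloadTime.sort(reverse=True)
--
--     i = 0
--     j = 0
--     count = 0
--     t = 0
--     maxv = 0
--
--     while i < len(buildingOpenTime):
--
--         while j < len(offloadTime) and count != 4:
--             t = buildingOpenTime[i] + offloadTime[j]
--             maxv = max(t, maxv)
--             count+=1
--             j+=1
--
--         count = 0
--         i += 1
--
--
--     return maxv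
-- ===== SOURCE B (Python) =====
-- def getMinTime(buildingOpenTime, offloadTime):
--     # Note: unlike A, this does not sort the argument lists in place (return value only).
--     b = sorted(buildingOpenTime)
--     o = sorted(offloadTime, reverse=True)
--     maxv = 0
--     for i, x in enumerate(b):
--         if 4 * i >= len(o):
--             break
--         maxv = max(maxv, x + o[4 * i])
--     return maxv
-- ===== Notes on version B (the rewrite author's own statement) =====
-- stated objective: simpler
-- what changed: B replaces A's two nested while-loops with mutable i/j/count/t state by one enumerate loop with a stride-4 index: after sorting offloads descending, offloadTime[4*i] is the largest offload in building i's group, so the inner 4-step scan disappears; B also does not mutate its arguments (A sorts them in place).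
import Mathlib
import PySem

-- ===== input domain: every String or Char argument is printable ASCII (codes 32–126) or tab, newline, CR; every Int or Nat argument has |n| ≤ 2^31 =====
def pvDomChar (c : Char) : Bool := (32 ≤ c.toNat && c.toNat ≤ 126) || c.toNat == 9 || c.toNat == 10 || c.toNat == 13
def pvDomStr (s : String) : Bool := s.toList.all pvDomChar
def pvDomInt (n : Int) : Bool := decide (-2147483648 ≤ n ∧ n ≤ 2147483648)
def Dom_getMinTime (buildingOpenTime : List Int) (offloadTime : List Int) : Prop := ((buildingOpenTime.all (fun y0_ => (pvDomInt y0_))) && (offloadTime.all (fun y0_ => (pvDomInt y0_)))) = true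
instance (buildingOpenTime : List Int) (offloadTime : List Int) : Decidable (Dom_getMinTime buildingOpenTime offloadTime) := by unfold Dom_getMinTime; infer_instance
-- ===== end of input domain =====

-- B replaces A's two nested while-loops (mutable i/j/count/t state) by one enumerate loop with a
-- stride-4 index into the descending offload list; equal return value proved (note: A sorts both
-- argument lists in place, B does not — the equivalence here is about the return value only).

-- ===== PORT A =====
-- inner 'while j < len(offloadTime) and count != 4' loop; state (j, count, t, maxv), returns (j, t, maxv).
-- b.getD i 0 / o.getD j 0 are exact for Python's b[i] / o[j]: i is guarded by the outer 'i < len(b)'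
-- and j by 'j < len(o)', so the defaults are never read.
def pvAInner (b o : List Int) (i : Nat) (j count : Nat) (t maxv : Int) : Nat × Int × Int :=
  if h : j < o.length ∧ count ≠ 4 then
    let t' := b.getD i 0 + o.getD j 0
    pvAInner b o i (j + 1) (count + 1) t' (max t' maxv)
  else (j, t, maxv)
termination_by o.length - j
decreasing_by omega

-- outer 'while i < len(buildingOpenTime)' loop
def pvAOuter (b o : List Int) (i j : Nat) (t maxv : Int) : Int :=
  if h : i < b.length then
    let r := pvAInner b o i j 0 t maxv
    pvAOuter b o (i + 1) r.1 r.2.1 r.2.2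
  else maxv
termination_by b.length - i
decreasing_by omega

def getMinTime (buildingOpenTime : List Int) (offloadTime : List Int) : Int :=
  pvAOuter (PySem.List.sorted buildingOpenTime (fun x => x) false)
           (PySem.List.sorted offloadTime (fun x => x) true) 0 0 0 0

-- ===== PORT B =====
-- 'for i, x in enumerate(b): if 4*i >= len(o): break; maxv = max(maxv, x + o[4*i])'
def pvBLoop (o : List Int) : List (Int × Int) → Int → Int
  | [], maxv => maxv
  | (i, x) :: rest, maxv =>
    if 4 * i ≥ (o.length : Int) then maxv
    else pvBLoop o rest (max maxv (x + PySem.List.pyGetD o (4 * i) 0))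

def getMinTime_alt (buildingOpenTime : List Int) (offloadTime : List Int) : Int :=
  let b := PySem.List.sorted buildingOpenTime (fun x => x) false
  let o := PySem.List.sorted offloadTime (fun x => x) true
  pvBLoop o (PySem.List.enumerate b) 0

-- ===== PRECONDITION & SPEC =====
def Spec_getMinTime (buildingOpenTime : List Int) (offloadTime : List Int) (out : Int) : Prop := out = getMinTime_alt buildingOpenTime offloadTime
instance (buildingOpenTime : List Int) (offloadTime : List Int) (out : Int) : Decidable (Spec_getMinTime buildingOpenTime offloadTime out) := by unfold Spec_getMinTime; infer_instance

-- ===== CLAIM (what is proved, stated in full; the proofs are below) =====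
def Claim_equal_getMinTime : Prop := ∀ (buildingOpenTime : List Int) (offloadTime : List Int), Dom_getMinTime buildingOpenTime offloadTime → Spec_getMinTime buildingOpenTime offloadTime (getMinTime buildingOpenTime offloadTime)

-- ===== LEMMAS AND PROOFS =====

-- the result maxv of the inner loop is at least the incoming maxv
theorem pvAInner_ge (b o : List Int) (i j count : Nat) (t maxv : Int) :
    maxv ≤ (pvAInner b o i j count t maxv).2.2 := by
  fun_induction pvAInner b o i j count t maxv with
  | case1 j count t maxv h t' ih => exact le_trans (le_max_right _ _) ih
  | case2 j count t maxv h => simp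

-- if the loop runs at least once, the first term b[i] + o[j] is in the result
theorem pvAInner_first (b o : List Int) (i j count : Nat) (t maxv : Int)
    (hj : j < o.length) (hc : count ≠ 4) :
    b.getD i 0 + o.getD j 0 ≤ (pvAInner b o i j count t maxv).2.2 := by
  rw [pvAInner, dif_pos ⟨hj, hc⟩]
  exact le_trans (le_max_left _ _) (pvAInner_ge ..)

-- every term the loop adds is bounded by C ⇒ the result is
theorem pvAInner_le (b o : List Int) (i : Nat) (C : Int) :
    ∀ (j count : Nat) (t maxv : Int), maxv ≤ C →
    (∀ k, j ≤ k → k < o.length → b.getD i 0 + o.getD k 0 ≤ C) →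
    (pvAInner b o i j count t maxv).2.2 ≤ C := by
  intro j count t maxv hm hb
  fun_induction pvAInner b o i j count t maxv generalizing C with
  | case1 j count t maxv h t' ih =>
      exact ih C (max_le (hb j le_rfl h.1) hm) (fun k hk hkl => hb k (by omega) hkl)
  | case2 j count t maxv h => exact hm

-- with the offload list descending, the inner loop's max is just its first term
theorem pvAInner_eq (b o : List Int) (i j count : Nat) (t maxv : Int)
    (hj : j < o.length) (hc : count ≠ 4)
    (hdesc : ∀ p q : Nat, p ≤ q → q < o.length → o.getD q 0 ≤ o.getD p 0) :
    (pvAInner b o i j count t maxv).2.2 = max maxv (b.getD i 0 + o.getD j 0) := by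
  apply le_antisymm
  · exact pvAInner_le b o i _ j count t maxv (le_max_left _ _)
      (fun k hk hkl => le_trans (by have := hdesc j k hk hkl; omega) (le_max_right _ _))
  · exact max_le (pvAInner_ge ..) (pvAInner_first b o i j count t maxv hj hc)

-- the inner loop advances j to min (j + (4 - count)) (len o)
theorem pvAInner_j (b o : List Int) (i : Nat) :
    ∀ (j count : Nat) (t maxv : Int), j ≤ o.length → count ≤ 4 →
    (pvAInner b o i j count t maxv).1 = min (j + (4 - count)) o.length := by
  intro j count t maxv hj hc
  fun_induction pvAInner b o i j count t maxv with
  | case1 j count t maxv h t' ih =>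
      rw [ih (by omega) (by omega)]; omega
  | case2 j count t maxv h => simp; omega

-- when the offloads are exhausted (len o ≤ j) the inner loop does nothing
theorem pvAInner_noop (b o : List Int) (i j count : Nat) (t maxv : Int)
    (hj : o.length ≤ j) : pvAInner b o i j count t maxv = (j, t, maxv) := by
  rw [pvAInner, dif_neg (by omega)]

-- once j has reached len o, A's outer loop never changes maxv again
theorem pvAOuter_stall (b o : List Int) :
    ∀ (i j : Nat) (t maxv : Int), o.length ≤ j → pvAOuter b o i j t maxv = maxv := by
  intro i j t maxv hj
  fun_induction pvAOuter b o i j t maxv with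
  | case1 i j t maxv h r ih =>
      have hr : r = (j, t, maxv) := pvAInner_noop b o i j 0 t maxv hj
      rw [hr] at ih ⊢
      exact ih hj
  | case2 i j t maxv h => rfl

-- main loop correspondence: at building index i with j = min (4*i) (len o), A's remaining
-- computation equals B's loop over the enumerated suffix of the sorted building list
theorem pvMain (b o : List Int)
    (hdesc : ∀ p q : Nat, p ≤ q → q < o.length → o.getD q 0 ≤ o.getD p 0) :
    ∀ (l : List Int) (i : Nat) (t maxv : Int), b.drop i = l →
    pvAOuter b o i (min (4 * i) o.length) t maxv
      = pvBLoop o (PySem.List.enumerate l (i : Int)) maxv := by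
  intro l
  induction l with
  | nil =>
      intro i t maxv hd
      have hi : b.length ≤ i := by
        by_contra hlt
        have := List.drop_eq_nil_iff.mp hd
        omega
      rw [pvAOuter]
      simp only [show ¬ i < b.length by omega, dite_false]
      simp [PySem.List.enumerate, pvBLoop]
  | cons x rest ih =>
      intro i t maxv hd
      have hi : i < b.length := by
        by_contra hge
        rw [List.drop_eq_nil_of_le (by omega)] at hd
        simp at hd
      have hx : b.getD i 0 = x := by
        have h0 : (b.drop i).getD 0 0 = x := by rw [hd]; rfl
        rw [List.getD_eq_getElem?_getD] at h0 ⊢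
        rwa [List.getElem?_drop, Nat.add_zero] at h0
      have hrest : b.drop (i + 1) = rest := by
        have h1 : (b.drop i).drop 1 = rest := by rw [hd]; rfl
        rwa [List.drop_drop] at h1
      rw [PySem.List.enumerate_cons, pvBLoop]
      by_cases hio : 4 * i < o.length
      · -- building i still has offloads: one real inner pass
        have hguard : ¬ (4 * (i : Int) ≥ (o.length : Int)) := by omega
        simp only [hguard, if_false]
        rw [pvAOuter]
        simp only [hi, dite_true]
        have hmin : min (4 * i) o.length = 4 * i := by omega
        rw [hmin]
        have hj := pvAInner_j b o i (4 * i) 0 t maxv (by omega) (by omega)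
        have hm := pvAInner_eq b o i (4 * i) 0 t maxv hio (by omega) hdesc
        have h4 : (pvAInner b o i (4 * i) 0 t maxv).1 = min (4 * (i + 1)) o.length := by
          rw [hj]; omega
        rw [h4, hm, hx]
        have hget : PySem.List.pyGetD o (4 * (i : Int)) 0 = o.getD (4 * i) 0 := by
          have : (4 * (i : Int)) = ((4 * i : Nat) : Int) := by push_cast; ring
          rw [this, PySem.List.pyGetD_natCast]
        rw [hget, max_comm maxv (x + o.getD (4 * i) 0)]
        have := ih (i + 1) (pvAInner b o i (4 * i) 0 t maxv).2.1
          (max (x + o.getD (4 * i) 0) maxv) hrest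
        rw [this]
        push_cast
        ring_nf
      · -- offloads exhausted: A stalls to maxv, B breaks
        have hguard : 4 * (i : Int) ≥ (o.length : Int) := by omega
        simp only [hguard, if_true]
        have hmin : min (4 * i) o.length = o.length := by omega
        rw [hmin]
        exact pvAOuter_stall b o i o.length t maxv le_rfl

-- the sorted-descending offload list satisfies the getD-monotonicity pvMain needs
theorem pvDesc (offloadTime : List Int) :
    ∀ p q : Nat, p ≤ q → q < (PySem.List.sorted offloadTime (fun x => x) true).length →
      (PySem.List.sorted offloadTime (fun x => x) true).getD q 0
        ≤ (PySem.List.sorted offloadTime (fun x => x) true).getD p 0 := by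
  intro p q hpq hq
  set o := PySem.List.sorted offloadTime (fun x => x) true with ho
  rcases Nat.eq_or_lt_of_le hpq with rfl | hlt
  · exact le_rfl
  · have hp : p < o.length := by omega
    rw [List.getD_eq_getElem o 0 hq, List.getD_eq_getElem o 0 hp]
    have hpw := PySem.List.sorted_pairwise_rev (xs := offloadTime) (key := fun x => x)
    rw [← ho] at hpw
    exact List.pairwise_iff_getElem.mp hpw p q hp hq hlt

-- ===== VERDICT (by name: the statement is the Claim_ definition above) =====
theorem getMinTime_spec : Claim_equal_getMinTime := by
  intro buildingOpenTime offloadTime _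
  unfold Spec_getMinTime getMinTime getMinTime_alt
  have := pvMain (PySem.List.sorted buildingOpenTime (fun x => x) false)
    (PySem.List.sorted offloadTime (fun x => x) true)
    (pvDesc offloadTime)
    (PySem.List.sorted buildingOpenTime (fun x => x) false) 0 0 0 rfl
  simpa using this
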